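-- pv_equiv track=rewrite | github.com/Marisolebxf/tech-kg-api | app/services/text_ngram.py | build_ngram_vocab
-- ===== SOURCE A (Python) =====
-- def build_ngram_vocab(texts: list[str], n: int = 2) -> dict[str, int]:
--     vocab: dict[str, int] = {}
--     for text in texts:
--         text_lower = text.lower()
--         for i in range(len(text_lower) - n + 1):
--             gram = text_lower[i : i + n]
--             if gram not in vocab:
--                 vocab[gram] = len(vocab)
--     return vocab
-- ===== SOURCE B (Python) =====
-- def build_ngram_vocab(texts: list[str], n: int = 2) -> dict[str, int]:
--     # all n-grams, each text lowercased once
--     stream = [t[i:i + n] for t in map(str.lower, texts) for i in range(len(t) - n + 1)]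
--     # reverse-overwrite pass with a descending position counter: last write
--     # wins, so each gram ends up mapped to its FIRST position in the stream
--     first: dict[str, int] = {}
--     pos = len(stream) - 1
--     for gram in reversed(stream):
--         first[gram] = pos
--         pos -= 1
--     # sort the distinct grams by first position to recover first-seen order
--     order = [gram for gram, _ in sorted(first.items(), key=lambda kv: kv[1])]
--     return {gram: idx for idx, gram in enumerate(order)}
-- ===== Notes on version B (the rewrite author's own statement) =====
-- stated objective: alternative
-- what changed: Replaces A's incremental membership-test-and-counter dict loop by a different algorithm: a reverse-overwrite pass mapping each gram to its first stream position, then a sort of the distinct grams by that position to recover first-seen order.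
import Mathlib
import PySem

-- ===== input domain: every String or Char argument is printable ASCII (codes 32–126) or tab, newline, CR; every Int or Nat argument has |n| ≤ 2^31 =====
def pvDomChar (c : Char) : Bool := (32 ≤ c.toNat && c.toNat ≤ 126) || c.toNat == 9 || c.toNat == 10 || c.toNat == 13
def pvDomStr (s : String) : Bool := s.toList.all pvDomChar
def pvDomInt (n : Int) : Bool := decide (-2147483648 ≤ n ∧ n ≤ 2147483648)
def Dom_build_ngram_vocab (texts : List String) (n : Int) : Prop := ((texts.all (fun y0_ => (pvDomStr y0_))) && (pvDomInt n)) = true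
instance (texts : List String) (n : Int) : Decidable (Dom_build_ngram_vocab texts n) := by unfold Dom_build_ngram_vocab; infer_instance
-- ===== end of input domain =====

-- B replaces A's incremental membership-test-and-counter loop by a different algorithm:
-- a reverse-overwrite pass mapping each gram to its first stream position, then a sort
-- of the distinct grams by that position; objective: alternative, similar cost.


-- ===== PORT A =====
def build_ngram_vocab (texts : List String) (n : Int) : List (String × Int) :=
  (texts.foldl (fun vocab text =>
      let text_lower := PySem.Chars.lower text.toList
      (PySem.List.pyRange 0 ((text_lower.length : Int) - n + 1) 1).foldl
        (fun vocab i =>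
          let gram := String.ofList (PySem.List.slice text_lower (some i) (some (i + n)))
          if vocab.contains gram then vocab
          else vocab.insert gram ((vocab.size : Nat) : Int))
        vocab)
    PySem.Dict.empty).items

-- ===== PORT B =====
def build_ngram_vocab_alt (texts : List String) (n : Int) : List (String × Int) :=
  let stream := texts.flatMap (fun text =>
    let t := PySem.Chars.lower text.toList
    (PySem.List.pyRange 0 ((t.length : Int) - n + 1) 1).map
      (fun i => String.ofList (PySem.List.slice t (some i) (some (i + n)))))
  let fp := stream.reverse.foldl (fun dp gram => (dp.1.insert gram dp.2, dp.2 - 1))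
      ((PySem.Dict.empty : PySem.Dict String Int), (stream.length : Int) - 1)
  let first := fp.1
  let order := (PySem.List.sorted first.items (fun kv => kv.2) false).map (fun kv => kv.1)
  (PySem.List.enumerate order 0).map (fun p => (p.2, p.1))

-- ===== PRECONDITION & SPEC =====
def Spec_build_ngram_vocab (texts : List String) (n : Int) (out : List (String × Int)) : Prop := out = build_ngram_vocab_alt texts n
instance (texts : List String) (n : Int) (out : List (String × Int)) : Decidable (Spec_build_ngram_vocab texts n out) := by unfold Spec_build_ngram_vocab; infer_instance

-- ===== CLAIM (what is proved, stated in full; the proofs are below) =====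
def Claim_equal_build_ngram_vocab : Prop := ∀ (texts : List String) (n : Int), Dom_build_ngram_vocab texts n → Spec_build_ngram_vocab texts n (build_ngram_vocab texts n)

-- ===== LEMMAS AND PROOFS =====

-- ---- A-side: A's dict as a function of the deduped gram list seen so far ----
def pvDictOf {α : Type} [BEq α] (s : List α) : PySem.Dict α Int :=
  PySem.Dict.mk ((PySem.List.enumerate s 0).map (fun p => (p.2, p.1)))

theorem pvAnySnd {α : Type} [BEq α] [LawfulBEq α] (g : α) : ∀ (s : List α) (k : Int),
    ((PySem.List.enumerate s k).any (fun p => p.2 == g)) = s.contains g := by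
  intro s
  induction s with
  | nil => intro k; rfl
  | cons x xs ih =>
      intro k
      rw [PySem.List.enumerate_cons]
      have hxg : (x == g) = (g == x) := by
        by_cases hx : x = g
        · simp [hx]
        · simp [hx, (Ne.symm hx : g ≠ x)]
      simp [ih, hxg]

theorem pvDictOf_contains {α : Type} [BEq α] [LawfulBEq α] (s : List α) (g : α) :
    (pvDictOf s).contains g = s.contains g := by
  simp only [pvDictOf, PySem.Dict.contains, List.any_map, Function.comp_def]
  exact pvAnySnd g s 0

theorem pvStepA {α : Type} [BEq α] [LawfulBEq α] (s : List α) (g : α) :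
    (if (pvDictOf s).contains g then pvDictOf s
     else (pvDictOf s).insert g (((pvDictOf s).size : Nat) : Int))
      = pvDictOf (PySem.Set.add s g) := by
  rw [pvDictOf_contains]
  by_cases h : g ∈ s
  · simp [PySem.Set.add, h]
  · have h' : s.contains g = false := by simpa using h
    simp only [h', Bool.false_eq_true, if_false, PySem.Set.add,
      PySem.Dict.insert, pvDictOf_contains]
    rw [if_neg (by simpa using h)]
    simp [pvDictOf, PySem.Dict.size, PySem.List.length_enumerate,
      PySem.List.enumerate_append, PySem.List.enumerate_cons, PySem.List.enumerate_nil]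

theorem pvFold {α : Type} [BEq α] [LawfulBEq α] (gs : List α) : ∀ (s : List α),
    gs.foldl (fun d g => if d.contains g then d
        else d.insert g ((d.size : Nat) : Int)) (pvDictOf s)
      = pvDictOf (gs.foldl PySem.Set.add s) := by
  induction gs with
  | nil => intro s; rfl
  | cons g gs ih =>
      intro s
      simp only [List.foldl_cons, pvStepA]
      exact ih (PySem.Set.add s g)

-- ---- B-side: first-occurrence pairs of an enumerated stream ----
def pvStep (acc : List (String × Int)) (p : Int × String) : List (String × Int) :=
  if acc.any (fun q => q.1 == p.2) then acc else acc ++ [(p.2, p.1)]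

def pvFP (e : List (Int × String)) : List (String × Int) := e.foldl pvStep []

theorem pvFP_append (e : List (Int × String)) (p : Int × String) :
    pvFP (e ++ [p]) = pvStep (pvFP e) p := by
  simp [pvFP, List.foldl_append]

-- key membership: pvFP e has a pair with key g  ↔  g occurs as a snd of e
theorem pvFP_mem (e : List (Int × String)) (g : String) :
    (∃ v, (g, v) ∈ pvFP e) ↔ (∃ pos, (pos, g) ∈ e) := by
  induction e using List.reverseRecOn with
  | nil => simp [pvFP]
  | append_singleton e p ih =>
      rw [pvFP_append, pvStep]
      by_cases h : (pvFP e).any (fun q => q.1 == p.2)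
      · rw [if_pos h]
        simp only [List.any_eq_true, beq_iff_eq] at h
        obtain ⟨q, hq, hqk⟩ := h
        constructor
        · intro hv
          obtain ⟨pos, hpos⟩ := ih.mp hv
          exact ⟨pos, by simp [hpos]⟩
        · intro ⟨pos, hpos⟩
          rcases List.mem_append.mp hpos with hl | hr
          · exact ih.mpr ⟨pos, hl⟩
          · rw [List.mem_singleton] at hr
            have hg : g = p.2 := congrArg Prod.snd hr
            exact ⟨q.2, by rw [hg, ← hqk]; exact hq⟩
      · rw [if_neg h]
        constructor
        · intro ⟨v, hv⟩
          rcases List.mem_append.mp hv with hl | hr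
          · obtain ⟨pos, hpos⟩ := ih.mp ⟨v, hl⟩
            exact ⟨pos, by simp [hpos]⟩
          · rw [List.mem_singleton] at hr
            have hg : g = p.2 := congrArg Prod.fst hr
            refine ⟨p.1, ?_⟩
            rw [hg]
            simp
        · intro ⟨pos, hpos⟩
          rcases List.mem_append.mp hpos with hl | hr
          · obtain ⟨v, hv⟩ := ih.mpr ⟨pos, hl⟩
            exact ⟨v, List.mem_append_left _ hv⟩
          · rw [List.mem_singleton] at hr
            have hg : g = p.2 := congrArg Prod.snd hr
            refine ⟨p.1, ?_⟩
            rw [hg]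
            simp

-- the keys of pvFP e are distinct
theorem pvFP_nodup (e : List (Int × String)) : ((pvFP e).map Prod.fst).Nodup := by
  induction e using List.reverseRecOn with
  | nil => simp [pvFP]
  | append_singleton e p ih =>
      rw [pvFP_append, pvStep]
      by_cases h : (pvFP e).any (fun q => q.1 == p.2)
      · rw [if_pos h]; exact ih
      · rw [if_neg h]
        simp only [List.any_eq_true, beq_iff_eq, not_exists, not_and] at h
        simp only [List.map_append, List.map_cons, List.map_nil]
        refine List.Nodup.append ih (List.nodup_singleton _) ?_
        intro a ha hb
        rw [List.mem_singleton] at hb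
        subst hb
        obtain ⟨q, hq, hqe⟩ := List.mem_map.mp ha
        exact h q hq hqe

-- each pair of pvFP e records the FIRST occurrence of its key in e
theorem pvFP_find (e : List (Int × String)) :
    ∀ p ∈ pvFP e, e.find? (fun q => q.2 == p.1) = some (p.2, p.1) := by
  induction e using List.reverseRecOn with
  | nil => simp [pvFP]
  | append_singleton e p ih =>
      rw [pvFP_append, pvStep]
      by_cases h : (pvFP e).any (fun q => q.1 == p.2)
      · rw [if_pos h]
        intro q hq
        rw [List.find?_append, ih q hq]
        rfl
      · rw [if_neg h]
        intro q hq
        rcases List.mem_append.mp hq with hl | hr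
        · rw [List.find?_append, ih q hl]; rfl
        · simp only [List.mem_singleton] at hr
          subst hr
          have hnone : e.find? (fun q => q.2 == p.2) = none := by
            rw [List.find?_eq_none]
            intro x hx hxp
            simp only [beq_iff_eq] at hxp
            have hex : ∃ v, (p.2, v) ∈ pvFP e :=
              (pvFP_mem e p.2).mpr ⟨x.1, by rw [← hxp]; exact hx⟩
            obtain ⟨v, hv⟩ := hex
            simp only [List.any_eq_true, beq_iff_eq, not_exists, not_and] at h
            exact h (p.2, v) hv rfl
          rw [List.find?_append, hnone]
          simp

-- every recorded position comes from e
theorem pvFP_pos (e : List (Int × String)) :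
    ∀ a ∈ pvFP e, ∃ q ∈ e, a.2 = q.1 := by
  intro a ha
  have hf := pvFP_find e a ha
  exact ⟨(a.2, a.1), List.mem_of_find?_eq_some hf, rfl⟩

-- positions recorded along pvFP e are strictly increasing
theorem pvFP_pairwise (e : List (Int × String))
    (he : e.Pairwise (fun p q => p.1 < q.1)) :
    (pvFP e).Pairwise (fun a b => a.2 < b.2) := by
  induction e using List.reverseRecOn with
  | nil => simp [pvFP]
  | append_singleton e p ih =>
      rw [pvFP_append, pvStep]
      rw [List.pairwise_append] at he
      obtain ⟨he1, -, he3⟩ := he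
      by_cases h : (pvFP e).any (fun q => q.1 == p.2)
      · rw [if_pos h]; exact ih he1
      · rw [if_neg h]
        rw [List.pairwise_append]
        refine ⟨ih he1, List.pairwise_singleton _ _, ?_⟩
        intro a ha b hb
        simp only [List.mem_singleton] at hb
        subst hb
        obtain ⟨q, hq, hqe⟩ := pvFP_pos e a ha
        rw [hqe]
        exact he3 q hq p (List.mem_singleton.mpr rfl)

-- ---- B-side: lookup in the reverse-overwrite dict fold = last write wins ----
theorem pvGet_fold (g : String) : ∀ (qs : List (Int × String)) (d : PySem.Dict String Int),
    (qs.foldl (fun d p => d.insert p.2 p.1) d).get? g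
      = (match qs.reverse.find? (fun p => p.2 == g) with
         | some p => some p.1
         | none => d.get? g) := by
  intro qs
  induction qs with
  | nil => intro d; rfl
  | cons q qs ih =>
      intro d
      rw [List.foldl_cons, ih, List.reverse_cons, List.find?_append]
      cases hf : qs.reverse.find? (fun p => p.2 == g) with
      | some p => rfl
      | none =>
          simp only [Option.none_or]
          by_cases hg : q.2 = g
          · subst hg
            simp [PySem.Dict.get?_insert_self]
          · have hq : (fun p : Int × String => p.2 == g) q = false := by simpa using hg
            rw [PySem.Dict.get?_insert_of_ne d q.1 (Ne.symm hg)]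
            simp [hq]

-- pvStep's membership test, phrased on the key list
theorem pvStep_eq (acc : List (String × Int)) (p : Int × String) :
    pvStep acc p
      = if p.2 ∈ acc.map Prod.fst then acc else acc ++ [(p.2, p.1)] := by
  rw [pvStep]
  by_cases h : p.2 ∈ acc.map Prod.fst
  · rw [if_pos h, if_pos]
    simp only [List.any_eq_true, beq_iff_eq]
    obtain ⟨q, hq, hqe⟩ := List.mem_map.mp h
    exact ⟨q, hq, hqe⟩
  · rw [if_neg h, if_neg]
    simp only [List.any_eq_true, beq_iff_eq, not_exists, not_and]
    intro q hq hqe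
    exact h (List.mem_map.mpr ⟨q, hq, hqe⟩)

-- the two dedup orders agree: keys of pvFP ∘ enumerate = A's foldl Set.add
theorem pvFP_mapfst (gs : List String) : ∀ (k : Int) (acc : List (String × Int)),
    (((PySem.List.enumerate gs k).foldl pvStep acc).map Prod.fst)
      = gs.foldl PySem.Set.add (acc.map Prod.fst) := by
  induction gs with
  | nil => intro k acc; simp [PySem.List.enumerate_nil]
  | cons g gs ih =>
      intro k acc
      rw [PySem.List.enumerate_cons, List.foldl_cons, List.foldl_cons, pvStep_eq]
      by_cases h : g ∈ acc.map Prod.fst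
      · rw [if_pos h, ih]
        have hadd : PySem.Set.add (acc.map Prod.fst) g = acc.map Prod.fst := by
          simp [PySem.Set.add, h]
        rw [hadd]
      · rw [if_neg h, ih]
        have hadd : PySem.Set.add (acc.map Prod.fst) g = acc.map Prod.fst ++ [g] := by
          simp [PySem.Set.add, h]
        rw [hadd]
        simp

-- the counter-carrying reverse fold is the reverse fold over the enumerated stream
theorem pvRevFold (gs : List String) : ∀ (k : Int) (d : PySem.Dict String Int),
    gs.reverse.foldl (fun dp gram => (dp.1.insert gram dp.2, dp.2 - 1))
        (d, k + (gs.length : Int) - 1)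
      = (((PySem.List.enumerate gs k).reverse).foldl (fun d p => d.insert p.2 p.1) d, k - 1) := by
  induction gs with
  | nil => intro k d; simp [PySem.List.enumerate_nil]
  | cons g gs ih =>
      intro k d
      rw [List.reverse_cons, List.foldl_append, PySem.List.enumerate_cons,
        List.reverse_cons, List.foldl_append]
      have hk : k + ((g :: gs).length : Int) - 1 = (k + 1) + (gs.length : Int) - 1 := by
        simp
        ring
      rw [hk, ih (k + 1) d]
      simp

-- assembly: A's dedup-with-counter dict equals B's sort-of-first-positions pipeline
theorem pvMain (gs : List String) :
    (pvDictOf (gs.foldl PySem.Set.add [])).items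
      = (PySem.List.enumerate
          ((PySem.List.sorted
              (gs.reverse.foldl (fun dp gram => (dp.1.insert gram dp.2, dp.2 - 1))
                  ((PySem.Dict.empty : PySem.Dict String Int), (gs.length : Int) - 1)).1.items
              (fun kv => kv.2) false).map (fun kv => kv.1))
          0).map (fun p => (p.2, p.1)) := by
  have hrev : (gs.reverse.foldl (fun dp gram => (dp.1.insert gram dp.2, dp.2 - 1))
      ((PySem.Dict.empty : PySem.Dict String Int), (gs.length : Int) - 1)).1
      = ((PySem.List.enumerate gs 0).reverse).foldl (fun d p => d.insert p.2 p.1)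
          (PySem.Dict.empty : PySem.Dict String Int) := by
    have h0 : (gs.length : Int) - 1 = 0 + (gs.length : Int) - 1 := by ring
    rw [h0, pvRevFold gs 0 PySem.Dict.empty]
  rw [hrev]
  set e := PySem.List.enumerate gs 0 with he
  set d := (e.reverse).foldl (fun d p => d.insert p.2 p.1)
      (PySem.Dict.empty : PySem.Dict String Int) with hd
  have hget : ∀ g, d.get? g = (match e.find? (fun q => q.2 == g) with
      | some q => some q.1 | none => none) := by
    intro g
    rw [hd, pvGet_fold g e.reverse PySem.Dict.empty, List.reverse_reverse]
    cases List.find? (fun q => q.2 == g) e <;> rfl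
  have hnd : d.keys.Nodup := by
    rw [hd]
    exact PySem.Dict.nodup_keys_foldl_insert_key e.reverse Prod.snd (fun _ p => p.1) _
      (by simp [PySem.Dict.keys_empty])
  have hlook : ∀ p ∈ pvFP e, d.getD p.1 0 = p.2 := by
    intro p hp
    rw [PySem.Dict.getD_eq_get?_getD, hget p.1, pvFP_find e p hp]
    rfl
  have hmemkeys : ∀ g, g ∈ d.keys ↔ ∃ pos, (pos, g) ∈ e := by
    intro g
    constructor
    · intro hk
      by_contra hno
      have hfnone : e.find? (fun q => q.2 == g) = none := by
        rw [List.find?_eq_none]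
        intro x hx hbx
        simp only [beq_iff_eq] at hbx
        exact hno ⟨x.1, by rw [← hbx]; exact hx⟩
      have hgn : d.get? g = none := by rw [hget g, hfnone]
      exact absurd hk ((PySem.Dict.get?_eq_none_iff_not_mem_keys d g).mp hgn)
    · intro ⟨pos, hpos⟩
      by_contra hk
      have hgn : d.get? g = none := (PySem.Dict.get?_eq_none_iff_not_mem_keys d g).mpr hk
      rw [hget g] at hgn
      cases hfind : e.find? (fun q => q.2 == g) with
      | some q => rw [hfind] at hgn; simp at hgn
      | none =>
          rw [List.find?_eq_none] at hfind
          exact hfind (pos, g) hpos (by simp)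
  have hkeysperm : ((pvFP e).map Prod.fst).Perm d.keys := by
    rw [List.perm_ext_iff_of_nodup (pvFP_nodup e) hnd]
    intro g
    rw [hmemkeys g, ← pvFP_mem e g]
    constructor
    · intro hm
      obtain ⟨q, hq, hqe⟩ := List.mem_map.mp hm
      exact ⟨q.2, by rw [← hqe]; exact hq⟩
    · intro ⟨v, hv⟩
      exact List.mem_map.mpr ⟨(g, v), hv, rfl⟩
  have hys : pvFP e = ((pvFP e).map Prod.fst).map (fun g => (g, d.getD g 0)) := by
    rw [List.map_map]
    have hcg : ∀ p ∈ pvFP e, ((fun g => (g, d.getD g 0)) ∘ Prod.fst) p = id p := by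
      intro p hp
      simp [hlook p hp]
    rw [List.map_congr_left hcg, List.map_id]
  have hperm : (pvFP e).Perm d.items := by
    rw [PySem.Dict.items_eq_map_keys d hnd 0, hys]
    exact hkeysperm.map _
  have hpw : (pvFP e).Pairwise (fun a b => a.2 < b.2) :=
    pvFP_pairwise e (by rw [he]; exact PySem.List.pairwise_lt_enumerate gs 0)
  have hsorted : PySem.List.sorted d.items (fun kv => kv.2) false = pvFP e :=
    PySem.List.sorted_eq_of_perm_of_pairwise_lt d.items (pvFP e) _ hperm hpw
  have hfst : (pvFP e).map Prod.fst = gs.foldl PySem.Set.add [] := by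
    have hm := pvFP_mapfst gs 0 []
    simpa [pvFP, he] using hm
  rw [hsorted, show (pvFP e).map (fun kv => kv.1) = (pvFP e).map Prod.fst from rfl, hfst]
  rfl

-- ===== VERDICT (by name: the statement is the Claim_ definition above) =====
theorem build_ngram_vocab_spec : Claim_equal_build_ngram_vocab := by
  intro texts n _
  unfold Spec_build_ngram_vocab build_ngram_vocab build_ngram_vocab_alt
  have hinner : (fun (vocab : PySem.Dict String Int) (text : String) =>
      let text_lower := PySem.Chars.lower text.toList
      (PySem.List.pyRange 0 ((text_lower.length : Int) - n + 1) 1).foldl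
        (fun vocab i =>
          let gram := String.ofList (PySem.List.slice text_lower (some i) (some (i + n)))
          if vocab.contains gram then vocab
          else vocab.insert gram ((vocab.size : Nat) : Int))
        vocab)
    = (fun (vocab : PySem.Dict String Int) (text : String) =>
        ((fun text =>
          let t := PySem.Chars.lower text.toList
          (PySem.List.pyRange 0 ((t.length : Int) - n + 1) 1).map
            (fun i => String.ofList (PySem.List.slice t (some i) (some (i + n))))) text).foldl
          (fun d g => if d.contains g then d else d.insert g ((d.size : Nat) : Int)) vocab) := by
      funext v t
      dsimp only
      exact (List.foldl_map
        (f := fun i => String.ofList (PySem.List.slice (PySem.Chars.lower t.toList) (some i) (some (i + n))))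
        (g := fun (d : PySem.Dict String Int) g =>
          if d.contains g then d else d.insert g ((d.size : Nat) : Int))
        (l := PySem.List.pyRange 0 (((PySem.Chars.lower t.toList).length : Int) - n + 1) 1)
        (init := v)).symm
  rw [hinner, ← List.foldl_flatMap]
  rw [show (PySem.Dict.empty : PySem.Dict String Int) = pvDictOf [] from rfl, pvFold]
  exact pvMain _
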